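-- pv_equiv track=rewrite | github.com/NyxeraLabs/Nyxera-Eye | src/nyxera_eye/clustering/certificate_correlation.py | correlate_by_certificate_serial
-- ===== SOURCE A (Python) =====
-- from collections import defaultdict
--
-- def correlate_by_certificate_serial(records: list[dict[str, str]]) -> dict[str, list[str]]:
--     """Group observed IPs by TLS certificate serial to track moving infrastructure."""
--     clusters: dict[str, list[str]] = defaultdict(list)
--
--     for record in records:
--         serial = record.get("certificate_serial", "").strip()
--         ip = record.get("ip", "").strip()
--         if not serial or not ip:
--             continue
--         if ip not in clusters[serial]:
--             clusters[serial].append(ip)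
--
--     return dict(clusters)
-- ===== SOURCE B (Python) =====
-- def correlate_by_certificate_serial(records: list[dict[str, str]]) -> dict[str, list[str]]:
--     """Group observed IPs by TLS certificate serial to track moving infrastructure."""
--     # Pass 1: flatten to a list of valid (serial, ip) pairs, in order.
--     pairs = []
--     for record in records:
--         serial = record.get("certificate_serial", "").strip()
--         ip = record.get("ip", "").strip()
--         if serial and ip:
--             pairs.append((serial, ip))
--     # Pass 2: order-preserving dedup of the PAIRS, then group by serial.
--     out: dict[str, list[str]] = {}
--     for serial, ip in dict.fromkeys(pairs):
--         out.setdefault(serial, []).append(ip)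
--     return out
-- ===== Notes on version B (the rewrite author's own statement) =====
-- stated objective: alternative
-- what changed: Replaces A's single scan with a per-record membership test inside a defaultdict by a flatten/dedup/group pipeline: collect all valid (serial, ip) pairs, deduplicate the pair list once with dict.fromkeys, then group the unique pairs by serial.
import Mathlib
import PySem

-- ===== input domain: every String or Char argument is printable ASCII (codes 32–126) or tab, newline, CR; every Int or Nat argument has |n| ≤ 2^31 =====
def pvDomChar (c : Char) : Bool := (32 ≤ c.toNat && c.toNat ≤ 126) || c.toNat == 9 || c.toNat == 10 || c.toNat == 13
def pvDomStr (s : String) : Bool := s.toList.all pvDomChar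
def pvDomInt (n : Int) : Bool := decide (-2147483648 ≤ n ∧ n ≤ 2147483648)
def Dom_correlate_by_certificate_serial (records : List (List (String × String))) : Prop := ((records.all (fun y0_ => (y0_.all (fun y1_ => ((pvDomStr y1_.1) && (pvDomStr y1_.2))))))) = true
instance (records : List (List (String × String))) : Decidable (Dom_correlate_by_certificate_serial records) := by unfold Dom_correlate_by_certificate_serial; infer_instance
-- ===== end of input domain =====

-- B replaces A's single dict-building scan (inline membership test per record) by a
-- flatten / dedup-pairs / group pipeline (objective: alternative).

-- ===== PORT A =====
-- loop body of A: defaultdict access creates the entry, membership test, conditional append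
def pvStepA (clusters : PySem.Dict String (List String)) (record : List (String × String)) :
    PySem.Dict String (List String) :=
  let serial := PySem.Str.strip ((PySem.Dict.mk record).getD "certificate_serial" "")
  let ip := PySem.Str.strip ((PySem.Dict.mk record).getD "ip" "")
  if serial = "" ∨ ip = "" then clusters
  else
    let cur := clusters.getD serial []
    clusters.insert serial (if ip ∈ cur then cur else cur ++ [ip])

def correlate_by_certificate_serial (records : List (List (String × String))) : List (String × List String) :=
  (records.foldl pvStepA PySem.Dict.empty).items

-- ===== PORT B =====
-- B pass 1 loop body: append every valid stripped (serial, ip) PAIR to a flat list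
def pvCollectPairs (pairs : List (String × String)) (record : List (String × String)) :
    List (String × String) :=
  let serial := PySem.Str.strip ((PySem.Dict.mk record).getD "certificate_serial" "")
  let ip := PySem.Str.strip ((PySem.Dict.mk record).getD "ip" "")
  if serial ≠ "" ∧ ip ≠ "" then pairs ++ [(serial, ip)] else pairs

-- B pass 2: dict.fromkeys dedup of the pair list, then group the unique pairs by serial
def correlate_by_certificate_serial_alt (records : List (List (String × String))) : List (String × List String) :=
  let pairs := records.foldl pvCollectPairs []
  ((PySem.List.dedup pairs).foldl
      (fun out p => out.modify p.1 [] (· ++ [p.2])) PySem.Dict.empty).items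

-- ===== PRECONDITION & SPEC =====
def Spec_correlate_by_certificate_serial (records : List (List (String × String))) (out : List (String × List String)) : Prop := out = correlate_by_certificate_serial_alt records
instance (records : List (List (String × String))) (out : List (String × List String)) : Decidable (Spec_correlate_by_certificate_serial records out) := by unfold Spec_correlate_by_certificate_serial; infer_instance

-- ===== CLAIM (what is proved, stated in full; the proofs are below) =====
def Claim_equal_correlate_by_certificate_serial : Prop := ∀ (records : List (List (String × String))), Dom_correlate_by_certificate_serial records → Spec_correlate_by_certificate_serial records (correlate_by_certificate_serial records)

-- ===== LEMMAS AND PROOFS =====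

-- grouping a pair list into a dict (B's pass 2 without the dedup)
def pvG (qs : List (String × String)) : PySem.Dict String (List String) :=
  qs.foldl (fun out p => out.modify p.1 [] (· ++ [p.2])) PySem.Dict.empty

-- A's running-state fold over records, expressed on the pair level (proof-side only)
def pvAdds (records : List (List (String × String))) (qs : List (String × String)) :
    List (String × String) :=
  records.foldl (fun qs record =>
    let serial := PySem.Str.strip ((PySem.Dict.mk record).getD "certificate_serial" "")
    let ip := PySem.Str.strip ((PySem.Dict.mk record).getD "ip" "")
    if serial ≠ "" ∧ ip ≠ "" then PySem.Set.add qs (serial, ip) else qs) qs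

theorem pv_mem_G (qs : List (String × String)) (s ip : String) :
    ip ∈ (pvG qs).getD s [] ↔ (s, ip) ∈ qs := by
  unfold pvG
  rw [PySem.Dict.getD_foldl_modify_append]
  simp only [PySem.Dict.getD_empty, List.nil_append, List.mem_map, List.mem_filter]
  constructor
  · rintro ⟨⟨a, b⟩, ⟨hmem, heq⟩, rfl⟩
    simp only [beq_iff_eq] at heq
    subst heq; exact hmem
  · intro h
    exact ⟨(s, ip), ⟨h, by simp⟩, rfl⟩

theorem pv_nodup_keys_foldl (qs : List (String × String)) :
    ∀ (d : PySem.Dict String (List String)), d.keys.Nodup →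
      (qs.foldl (fun out p => out.modify p.1 [] (· ++ [p.2])) d).keys.Nodup := by
  induction qs with
  | nil => intro d h; exact h
  | cons p rest ih =>
    intro d h
    rw [List.foldl_cons]
    apply ih
    rw [PySem.Dict.keys_modify]
    by_cases hc : d.contains p.1
    · rwa [PySem.Dict.keys_insert_of_contains _ _ hc]
    · rw [PySem.Dict.keys_insert_of_not_contains _ _ (by simpa using hc)]
      have : p.1 ∉ d.keys := by
        intro hm
        rw [PySem.Dict.contains_eq_decide_mem_keys] at hc
        simp [hm] at hc
      simp [List.nodup_append, h]
      intro a ha he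
      exact this (he ▸ ha)

theorem pv_nodup_keys_G (qs : List (String × String)) : (pvG qs).keys.Nodup := by
  unfold pvG
  exact pv_nodup_keys_foldl qs PySem.Dict.empty (by simp [PySem.Dict.keys_empty])

theorem pv_insert_getD_self (d : PySem.Dict String (List String)) (k : String)
    (hc : d.contains k = true) (hn : d.keys.Nodup) :
    d.insert k (d.getD k []) = d := by
  have hitems := PySem.Dict.items_insert_of_contains d (d.getD k []) hc
  have hmap : List.map (fun p => if (p.1 == k) = true then (k, d.getD k []) else p) d.items
      = d.items := by
    conv_rhs => rw [← List.map_id d.items]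
    apply List.map_congr_left
    intro p hp
    by_cases hpk : p.1 = k
    · have hkv : (k, p.2) ∈ d.items := by rw [← hpk]; exact hp
      have := PySem.Dict.getD_of_mem_items d hkv hn []
      simp only [hpk, beq_self_eq_true, if_true, this, id]
      exact Prod.ext_iff.mpr ⟨hpk.symm, rfl⟩
    · simp [hpk]
  -- dict equality from items equality
  have : (d.insert k (d.getD k [])).items = d.items := by rw [hitems, hmap]
  calc d.insert k (d.getD k []) = PySem.Dict.mk (d.insert k (d.getD k [])).items := rfl
    _ = PySem.Dict.mk d.items := by rw [this]
    _ = d := rfl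

theorem pv_contains_of_mem_getD (d : PySem.Dict String (List String)) (k ip : String)
    (h : ip ∈ d.getD k []) : d.contains k = true := by
  by_contra hc
  have hc' : d.contains k = false := by
    cases hcc : d.contains k
    · rfl
    · exact absurd hcc hc
  rw [PySem.Dict.getD_of_not_contains d [] hc'] at h
  exact absurd h (List.not_mem_nil)

theorem pv_stepA_G (qs : List (String × String)) (record : List (String × String)) :
    pvStepA (pvG qs) record =
      pvG (let serial := PySem.Str.strip ((PySem.Dict.mk record).getD "certificate_serial" "")
           let ip := PySem.Str.strip ((PySem.Dict.mk record).getD "ip" "")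
           if serial ≠ "" ∧ ip ≠ "" then PySem.Set.add qs (serial, ip) else qs) := by
  unfold pvStepA
  set serial := PySem.Str.strip ((PySem.Dict.mk record).getD "certificate_serial" "") with hs
  set ip := PySem.Str.strip ((PySem.Dict.mk record).getD "ip" "") with hi
  clear hs hi
  by_cases h : serial = "" ∨ ip = ""
  · rw [if_pos h, if_neg (by tauto)]
  · have h' : serial ≠ "" ∧ ip ≠ "" := by tauto
    rw [if_neg h, if_pos h']
    by_cases hm : ip ∈ (pvG qs).getD serial []
    · have hq : (serial, ip) ∈ qs := (pv_mem_G qs serial ip).1 hm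
      have hadd : PySem.Set.add qs (serial, ip) = qs := by
        simp [PySem.Set.add, PySem.Set.contains, hq]
      rw [hadd]
      simp only [if_pos hm]
      exact pv_insert_getD_self (pvG qs) serial
        (pv_contains_of_mem_getD _ _ _ hm) (pv_nodup_keys_G qs)
    · have hq : (serial, ip) ∉ qs := fun hmem => hm ((pv_mem_G qs serial ip).2 hmem)
      have hadd : PySem.Set.add qs (serial, ip) = qs ++ [(serial, ip)] := by
        simp [PySem.Set.add, PySem.Set.contains, hq]
      rw [hadd]
      simp only [if_neg hm]
      show (pvG qs).insert serial ((pvG qs).getD serial [] ++ [ip]) = pvG (qs ++ [(serial, ip)])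
      unfold pvG
      rw [List.foldl_append]
      rfl

theorem pv_main (records : List (List (String × String))) :
    ∀ qs, records.foldl pvStepA (pvG qs) = pvG (pvAdds records qs) := by
  induction records with
  | nil => intro qs; rfl
  | cons r rest ih =>
    intro qs
    unfold pvAdds
    rw [List.foldl_cons, List.foldl_cons, pv_stepA_G]
    exact ih _

theorem pv_collect_acc (records : List (List (String × String))) :
    ∀ acc, records.foldl pvCollectPairs acc = acc ++ records.foldl pvCollectPairs [] := by
  induction records with
  | nil => intro acc; simp
  | cons r rest ih =>
    intro acc
    rw [List.foldl_cons, List.foldl_cons, ih (pvCollectPairs acc r), ih (pvCollectPairs [] r)]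
    unfold pvCollectPairs
    dsimp only
    split_ifs <;> simp

theorem pv_adds_eq (records : List (List (String × String))) :
    ∀ qs, pvAdds records qs = (records.foldl pvCollectPairs []).foldl PySem.Set.add qs := by
  induction records with
  | nil => intro qs; rfl
  | cons r rest ih =>
    intro qs
    unfold pvAdds
    rw [List.foldl_cons, List.foldl_cons, pv_collect_acc rest (pvCollectPairs [] r),
      List.foldl_append]
    have hstep : (pvCollectPairs [] r).foldl PySem.Set.add qs =
        (let serial := PySem.Str.strip ((PySem.Dict.mk r).getD "certificate_serial" "")
         let ip := PySem.Str.strip ((PySem.Dict.mk r).getD "ip" "")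
         if serial ≠ "" ∧ ip ≠ "" then PySem.Set.add qs (serial, ip) else qs) := by
      unfold pvCollectPairs
      dsimp only
      split_ifs <;> rfl
    rw [← hstep] at *
    exact ih _

-- ===== VERDICT (by name: the statement is the Claim_ definition above) =====
theorem correlate_by_certificate_serial_spec : Claim_equal_correlate_by_certificate_serial := by
  intro records _
  show correlate_by_certificate_serial records = correlate_by_certificate_serial_alt records
  unfold correlate_by_certificate_serial correlate_by_certificate_serial_alt
  have hG : (PySem.Dict.empty : PySem.Dict String (List String)) = pvG [] := rfl
  rw [hG, pv_main records [], pv_adds_eq records []]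
  rfl
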